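-- pv_equiv track=rewrite | github.com/patrykjasinski1989/gu2_automation | eai.py | get_expiration_date
-- ===== SOURCE A (Python) =====
-- def get_expiration_date(contract_data):
--     expiration_date = ''
--     expiration_date_in_next_line = False
--     for line in contract_data:
--         if 'expirationDate' in line:
--             expiration_date_in_next_line = True
--             continue
--         if expiration_date_in_next_line:
--             expiration_date = line.split('<TD>')[1].split('</TD>')[0]
--             break
--     return expiration_date
-- ===== SOURCE B (Python) =====
-- def get_expiration_date(contract_data):
--     markers = ['expirationDate' in line for line in contract_data]
--     if True not in markers:
--         return ''
--     start = markers.index(True) + 1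
--     candidates = [line for line, m in zip(contract_data[start:], markers[start:]) if not m]
--     if not candidates:
--         return ''
--     return candidates[0].split('<TD>')[1].split('</TD>')[0]
-- ===== Notes on version B (the rewrite author's own statement) =====
-- stated objective: alternative
-- what changed: Replaces A's single stateful scan with a never-reset flag by a declarative pipeline: precompute a boolean marker mask for all lines, locate the first marker with .index, then filter the whole tail for non-marker lines and extract from the first candidate.
import Mathlib
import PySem

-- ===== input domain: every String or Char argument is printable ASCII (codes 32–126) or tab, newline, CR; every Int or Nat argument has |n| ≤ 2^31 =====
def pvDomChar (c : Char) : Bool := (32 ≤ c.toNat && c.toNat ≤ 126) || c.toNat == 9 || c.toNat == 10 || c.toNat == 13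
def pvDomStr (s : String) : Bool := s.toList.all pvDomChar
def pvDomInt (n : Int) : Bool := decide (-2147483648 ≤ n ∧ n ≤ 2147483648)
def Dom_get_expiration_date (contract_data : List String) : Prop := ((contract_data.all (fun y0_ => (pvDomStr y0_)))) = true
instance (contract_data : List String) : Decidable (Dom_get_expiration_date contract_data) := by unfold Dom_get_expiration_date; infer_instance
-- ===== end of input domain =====

-- B replaces A's stateful flagged scan by a declarative pipeline (marker mask, index, filter); alternative decomposition, same cost.


-- ===== PORT A =====
-- 'expirationDate' in line
def pvMarker (line : String) : Bool := PySem.Str.isIn "expirationDate" line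
-- line.split('<TD>')[1].split('</TD>')[0]; the [1] raises IndexError in Python when
-- '<TD>' is absent (PySem.List.pyGet? = none there) — those inputs are excluded by Pre_.
def pvExtract (line : String) : String :=
  match PySem.List.pyGet? ((PySem.Str.split? line "<TD>").getD []) 1 with
  | some t => ((PySem.Str.split? t "</TD>").getD []).headD ""
  | none => ""
-- A's single loop with the never-reset flag; break = return of pvExtract
def pvALoop : List String → Bool → String
  | [], _ => ""
  | line :: rest, flag =>
    if pvMarker line then pvALoop rest true
    else if flag then pvExtract line
    else pvALoop rest false
def get_expiration_date (contract_data : List String) : String :=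
  pvALoop contract_data false

-- ===== PORT B =====
-- markers = ['expirationDate' in line for line in contract_data]; markers.index(True);
-- candidates = [line for line, m in zip(contract_data[start:], markers[start:]) if not m]
def get_expiration_date_alt (contract_data : List String) : String :=
  match PySem.List.index? (contract_data.map pvMarker) true with
  | none => ""
  | some i =>
    match (((PySem.List.slice contract_data (some ((i : Int) + 1)) none).zip
          (PySem.List.slice (contract_data.map pvMarker) (some ((i : Int) + 1)) none)).filter
            (fun p => !p.2)).map Prod.fst with
    | [] => ""
    | v :: _ => pvExtract v

-- ===== PRECONDITION & SPEC =====
-- Pre_ excludes exactly the inputs on which Python A (and B) raise IndexError: those where the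
-- first non-marker line after the first marker line exists but does not contain '<TD>'.
def Pre_get_expiration_date (contract_data : List String) : Prop :=
  ((List.range contract_data.length).all fun j =>
    if !pvMarker (contract_data.getD j "")
        && (List.range j).any (fun i => pvMarker (contract_data.getD i ""))
        && (List.range j).all (fun k => pvMarker (contract_data.getD k "")
             || (List.range k).all fun i => !pvMarker (contract_data.getD i ""))
    then PySem.Str.isIn "<TD>" (contract_data.getD j "")
    else true) = true
instance (contract_data : List String) : Decidable (Pre_get_expiration_date contract_data) := by
  unfold Pre_get_expiration_date; infer_instance
def pvWitness_get_expiration_date : List String :=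
  ["foo expirationDate bar", "x<TD>2020-01-01</TD>y"]
def Spec_get_expiration_date (contract_data : List String) (out : String) : Prop := out = get_expiration_date_alt contract_data
instance (contract_data : List String) (out : String) : Decidable (Spec_get_expiration_date contract_data out) := by unfold Spec_get_expiration_date; infer_instance

-- ===== CLAIM (what is proved, stated in full; the proofs are below) =====
def Claim_equal_get_expiration_date : Prop := ∀ (contract_data : List String), Dom_get_expiration_date contract_data → Pre_get_expiration_date contract_data → Spec_get_expiration_date contract_data (get_expiration_date contract_data)

-- ===== LEMMAS AND PROOFS =====
-- zip a list with its own mask, filter by the mask, project: that is just a filter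
theorem pv_zip_mask_filter (xs : List String) :
    (((xs.zip (xs.map pvMarker)).filter (fun p => !p.2)).map Prod.fst)
      = xs.filter (fun l => !pvMarker l) := by
  induction xs with
  | nil => rfl
  | cons l rest ih =>
    by_cases h : pvMarker l = true <;> simp [h, ih]

-- once the flag is set, A's loop extracts from the first non-marker line = head of the filter
theorem pvALoop_true_eq_filter (xs : List String) :
    pvALoop xs true =
      (match xs.filter (fun l => !pvMarker l) with
       | [] => ""
       | v :: _ => pvExtract v) := by
  induction xs with
  | nil => rfl
  | cons l rest ih =>
    by_cases h : pvMarker l = true <;> simp [pvALoop, h, ih]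

-- with the flag clear, A's loop equals B's pipeline
theorem pvALoop_false_eq_alt (xs : List String) :
    pvALoop xs false = get_expiration_date_alt xs := by
  induction xs with
  | nil => rfl
  | cons l rest ih =>
    unfold get_expiration_date_alt
    rw [show (l :: rest).map pvMarker = pvMarker l :: rest.map pvMarker from rfl]
    by_cases h : pvMarker l = true
    · rw [h, PySem.List.index?_cons_self]
      have h1 : PySem.List.slice (l :: rest) (some (((0 : Nat) : Int) + 1)) none = rest := by
        have := PySem.List.slice_from_natCast (l :: rest) 1
        push_cast at this ⊢; rw [this]; rfl
      have h2 : PySem.List.slice (true :: rest.map pvMarker) (some (((0 : Nat) : Int) + 1)) none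
          = rest.map pvMarker := by
        have := PySem.List.slice_from_natCast (true :: rest.map pvMarker) 1
        push_cast at this ⊢; rw [this]; rfl
      simp only [pvALoop, h]
      rw [pvALoop_true_eq_filter rest]
      show _ = (match (((PySem.List.slice (l :: rest) (some (((0 : Nat) : Int) + 1)) none).zip
          (PySem.List.slice (true :: rest.map pvMarker) (some (((0 : Nat) : Int) + 1)) none)).filter
            (fun p => !p.2)).map Prod.fst with
        | [] => ""
        | v :: _ => pvExtract v)
      rw [h1, h2, pv_zip_mask_filter]
      simp
    · have hb : pvMarker l = false := by simpa using h
      rw [hb, show PySem.List.index? (false :: rest.map pvMarker) true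
            = (PySem.List.index? (rest.map pvMarker) true).map (· + 1) from
          PySem.List.index?_cons_of_ne _ (by decide)]
      have hstep : pvALoop (l :: rest) false = pvALoop rest false := by
        simp [pvALoop, hb]
      rw [hstep, ih]; unfold get_expiration_date_alt
      rw [show (rest.map pvMarker) = rest.map pvMarker from rfl]
      cases hidx : PySem.List.index? (rest.map pvMarker) true with
      | none => simp
      | some i =>
        simp only [Option.map_some]
        have hsl : ∀ {α : Type} (x : α) (ys : List α),
            PySem.List.slice (x :: ys) (some ((i : Int) + 1 + 1)) none
              = PySem.List.slice ys (some ((i : Int) + 1)) none := by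
          intro α x ys
          have h1 := PySem.List.slice_from_natCast (x :: ys) (i + 2)
          have h2 := PySem.List.slice_from_natCast ys (i + 1)
          push_cast at h1 h2
          rw [show (i : Int) + 1 + 1 = (i : Int) + 2 by ring, h1, h2]
          simp [List.drop_succ_cons]
        push_cast
        rw [hsl l rest, hsl false (rest.map pvMarker)]

-- ===== VERDICT (by name: the statement is the Claim_ definition above) =====
theorem get_expiration_date_spec : Claim_equal_get_expiration_date := by
  intro cd _ _
  unfold Spec_get_expiration_date get_expiration_date
  exact pvALoop_false_eq_alt cd
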